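-- pv_equiv track=rewrite | github.com/heitorchang/learn-code | battles/challenges/created/my-solutions/booAnalysis.py | booAnalysis
-- ===== SOURCE A (Python) =====
-- def isBoo(s):
--     if len(s) == 0:
--         return False
--     if s[0] == 'u':
--         return False
--     try:
--         uleftidx = s.index('u')
--     except ValueError:
--         return False
--
--     try:
--         urightidx = s.rindex('u') + 1
--     except ValueError:
--         return False
--
--     for i in range(uleftidx, urightidx):
--         if s[i] != 'u':
--             return False
--
--     leftos = s[:uleftidx]
--     rightos = s[urightidx:]
--
--     return leftos == rightos
--
-- def booAnalysis(s):
--     lens = len(s)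
--     maxboo = 0
--     for boo1left in range(lens+1):
--         for boo1right in range(boo1left, lens+1):
--             for boo2left in range(boo1right, lens+1):
--                 for boo2right in range(boo2left, lens+1):
--                     boo1 = s[boo1left:boo1right]
--                     boo2 = s[boo2left:boo2right]
--
--                     if isBoo(boo1):
--                         maxboo = max(maxboo, len(boo1))
--
--                     if isBoo(boo2):
--                         maxboo = max(maxboo, len(boo2))
--
--                     if isBoo(boo1) and isBoo(boo2):
--                         maxboo = max(maxboo, len(boo1) + len(boo2))
--     return maxboo
-- ===== SOURCE B (Python) =====
-- def isBoo(s):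
--     if len(s) == 0:
--         return False
--     if s[0] == 'u':
--         return False
--     try:
--         uleftidx = s.index('u')
--     except ValueError:
--         return False
--
--     try:
--         urightidx = s.rindex('u') + 1
--     except ValueError:
--         return False
--
--     for i in range(uleftidx, urightidx):
--         if s[i] != 'u':
--             return False
--
--     leftos = s[:uleftidx]
--     rightos = s[urightidx:]
--
--     return leftos == rightos
--
-- def booAnalysis(s):
--     n = len(s)
--     ans = 0
--     bestEnd = []  # bestEnd[e] = max length of a boo substring lying inside s[:e]
--     for r in range(n + 1):
--         cur = bestEnd[-1] if bestEnd else 0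
--         for l in range(r + 1):
--             if isBoo(s[l:r]):
--                 length = r - l
--                 ans = max(ans, length)                      # one boo
--                 if bestEnd[l] > 0:                          # two disjoint boos
--                     ans = max(ans, length + bestEnd[l])
--                 cur = max(cur, length)
--         bestEnd.append(cur)
--     return ans
-- ===== Notes on version B (the rewrite author's own statement) =====
-- stated objective: faster
-- what changed: Replaces the quadruple loop over all ordered pairs of candidate intervals (O(n^4) interval pairs, each checked with isBoo) by one pass over single intervals that records, per right endpoint, the best boo length ending by that position (prefix maximum), so the best disjoint partner of each boo is a single O(1) lookup.
import Mathlib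
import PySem

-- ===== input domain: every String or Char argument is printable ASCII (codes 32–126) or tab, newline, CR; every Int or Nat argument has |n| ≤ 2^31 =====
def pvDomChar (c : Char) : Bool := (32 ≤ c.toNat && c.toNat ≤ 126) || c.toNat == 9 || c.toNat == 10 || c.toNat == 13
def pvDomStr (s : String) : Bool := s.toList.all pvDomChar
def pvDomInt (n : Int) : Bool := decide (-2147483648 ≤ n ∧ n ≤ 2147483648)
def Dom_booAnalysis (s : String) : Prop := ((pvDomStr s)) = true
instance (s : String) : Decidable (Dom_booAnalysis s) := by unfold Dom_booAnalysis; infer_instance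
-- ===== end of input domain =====

-- B replaces A's quadruple interval loop by one pass over single intervals with a prefix-maximum
-- table of the best boo ending by each position (objective: faster, asymptotically).

-- ===== PORT A =====
-- Both Pythons share the helper isBoo; this is its port, on the slice's character list.
-- s.index('u') is ported as the first occurrence of the character 'u' (the needle is one char);
-- s.rindex('u') is ported by hand as len - 1 - (index of 'u' in the reversed list), which is exact.
def isBooP (t : List Char) : Bool :=
  if t.length = 0 then false
  else if PySem.List.pyGet? t 0 == some 'u' then false
  else
    match PySem.List.index? t 'u' with
    | none => false            -- ValueError from s.index
    | some ul =>
      match PySem.List.index? t.reverse 'u' with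
      | none => false          -- ValueError from s.rindex (unreachable: 'u' ∈ t here)
      | some j =>
        let ur : Nat := (t.length - 1 - j) + 1
        -- for i in range(uleftidx, urightidx): if s[i] != 'u': return False
        if (PySem.List.pyRange (ul : Int) (ur : Int)).all
            (fun i => PySem.List.pyGet? t i == some 'u') then
          -- leftos == rightos
          PySem.List.slice t none (some (ul : Int)) == PySem.List.slice t (some (ur : Int)) none
        else false

def booAnalysis (s : String) : Int :=
  let t := s.toList
  let lens : Int := t.length
  (PySem.List.pyRange 0 (lens + 1)).foldl (fun m b1l =>
    (PySem.List.pyRange b1l (lens + 1)).foldl (fun m b1r =>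
      (PySem.List.pyRange b1r (lens + 1)).foldl (fun m b2l =>
        (PySem.List.pyRange b2l (lens + 1)).foldl (fun m b2r =>
          let boo1 := PySem.List.slice t (some b1l) (some b1r)
          let boo2 := PySem.List.slice t (some b2l) (some b2r)
          let m := if isBooP boo1 then max m (boo1.length : Int) else m
          let m := if isBooP boo2 then max m (boo2.length : Int) else m
          if isBooP boo1 && isBooP boo2 then
            max m ((boo1.length : Int) + (boo2.length : Int))
          else m) m) m) m) 0

-- ===== PORT B =====
-- bestEnd[l] is read only when isBoo(s[l:r]) holds, hence in range; .getD 0 is a total rendering.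
def booAnalysis_alt (s : String) : Int :=
  let t := s.toList
  let n : Int := t.length
  ((PySem.List.pyRange 0 (n + 1)).foldl (fun (st : Int × List Int) r =>
      let cur : Int := if st.2 == [] then 0 else (PySem.List.pyGet? st.2 (-1)).getD 0
      let p := (PySem.List.pyRange 0 (r + 1)).foldl (fun (p : Int × Int) l =>
          if isBooP (PySem.List.slice t (some l) (some r)) then
            let length := r - l
            let ans := max p.1 length
            let b := (PySem.List.pyGet? st.2 l).getD 0
            let ans := if b > 0 then max ans (length + b) else ans
            (ans, max p.2 length)
          else p) (st.1, cur)
      (p.1, st.2 ++ [p.2])) ((0 : Int), ([] : List Int))).1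

-- ===== PRECONDITION & SPEC =====
def Spec_booAnalysis (s : String) (out : Int) : Prop := out = booAnalysis_alt s
instance (s : String) (out : Int) : Decidable (Spec_booAnalysis s out) := by unfold Spec_booAnalysis; infer_instance

-- ===== CLAIM (what is proved, stated in full; the proofs are below) =====
def Claim_equal_booAnalysis : Prop := ∀ (s : String), Dom_booAnalysis s → Spec_booAnalysis s (booAnalysis s)

-- ===== LEMMAS AND PROOFS =====

def pvSub (t : List Char) (l r : Nat) : List Char := (t.drop l).take (r - l)
def pvP (t : List Char) (l r : Nat) : Bool := isBooP (pvSub t l r)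
-- max of a list of nonnegative candidates
def pvFm (xs : List Int) : Int := xs.foldl max 0
def pvVal (t : List Char) (l r : Nat) : Int := if pvP t l r then ((r - l : Nat) : Int) else 0
def pvBestAt (t : List Char) (r : Nat) : Int := pvFm ((List.range (r + 1)).map (fun l => pvVal t l r))
def pvBestIn (t : List Char) : Nat → Int
  | 0 => pvBestAt t 0
  | e + 1 => max (pvBestIn t e) (pvBestAt t (e + 1))
def pvG (t : List Char) (l r : Nat) : Int := if pvP t l r then ((r - l : Nat) : Int) + pvBestIn t l else 0
def pvAnsAt (t : List Char) (r : Nat) : Int := pvFm ((List.range (r + 1)).map (fun l => pvG t l r))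
def pvAnsUpto (t : List Char) : Nat → Int
  | 0 => pvAnsAt t 0
  | r + 1 => max (pvAnsUpto t r) (pvAnsAt t (r + 1))

-- A's per-quadruple contribution and the nested suprema of A's four loops
def pvHq (t : List Char) (b1l b1r b2l b2r : Int) : Int :=
  let boo1 := PySem.List.slice t (some b1l) (some b1r)
  let boo2 := PySem.List.slice t (some b2l) (some b2r)
  max (max (if isBooP boo1 then (boo1.length : Int) else 0)
           (if isBooP boo2 then (boo2.length : Int) else 0))
      (if isBooP boo1 && isBooP boo2 then (boo1.length : Int) + (boo2.length : Int) else 0)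
def pvS3 (t : List Char) (n b1l b1r b2l : Int) : Int :=
  pvFm ((PySem.List.pyRange b2l (n + 1)).map (pvHq t b1l b1r b2l))
def pvS2 (t : List Char) (n b1l b1r : Int) : Int :=
  pvFm ((PySem.List.pyRange b1r (n + 1)).map (pvS3 t n b1l b1r))
def pvS1 (t : List Char) (n b1l : Int) : Int :=
  pvFm ((PySem.List.pyRange b1l (n + 1)).map (pvS2 t n b1l))
def pvS0 (t : List Char) (n : Int) : Int :=
  pvFm ((PySem.List.pyRange 0 (n + 1)).map (pvS1 t n))
lemma pvFm_nonneg (xs : List Int) : 0 ≤ pvFm xs := (PySem.List.le_foldl_max xs 0).1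
lemma pvLe_fm {x : Int} {xs : List Int} (h : x ∈ xs) : x ≤ pvFm xs := (PySem.List.le_foldl_max xs 0).2 x h
lemma pvFm_le {xs : List Int} {c : Int} (h0 : 0 ≤ c) (h : ∀ x ∈ xs, x ≤ c) : pvFm xs ≤ c := by
  rcases PySem.List.foldl_max_mem xs 0 with h' | h'
  · rw [pvFm, h']; exact h0
  · exact h _ h'
lemma pvFm_shift (xs : List Int) : ∀ a : Int, 0 ≤ a → xs.foldl max a = max a (pvFm xs) := by
  induction xs with
  | nil => intro a ha; simp [pvFm, max_eq_left ha]
  | cons h t ih =>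
    intro a ha
    have h1 := ih (max a h) (le_trans ha (le_max_left _ _))
    have h2 := ih (max 0 h) (le_max_left _ _)
    simp only [List.foldl_cons, pvFm] at *
    rw [h1, h2, ← max_assoc, ← max_assoc, max_eq_left ha]
lemma pvFoldA (xs : List Int) (f : Int → Int → Int) (F : Int → Int)
    (hstep : ∀ m x, x ∈ xs → 0 ≤ m → f m x = max m (F x))
    (hF : ∀ x ∈ xs, 0 ≤ F x) :
    ∀ m0 : Int, 0 ≤ m0 → xs.foldl f m0 = max m0 (pvFm (xs.map F)) := by
  induction xs with
  | nil => intro m0 hm; simp [pvFm, max_eq_left hm]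
  | cons h t ih =>
    intro m0 hm
    have hb : f m0 h = max m0 (F h) := hstep m0 h (by simp) hm
    have hFh : 0 ≤ F h := hF h (by simp)
    simp only [List.foldl_cons, List.map_cons, hb]
    rw [ih (fun m x hx => hstep m x (by simp [hx])) (fun x hx => hF x (by simp [hx])) _
        (le_trans hm (le_max_left _ _))]
    show _ = max m0 (pvFm (F h :: t.map F))
    have : pvFm (F h :: t.map F) = max (max 0 (F h)) (pvFm (t.map F)) := by
      simp only [pvFm, List.foldl_cons]
      exact pvFm_shift _ _ (le_max_left _ _)
    rw [this, max_eq_right hFh, ← max_assoc]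
lemma pvFm_snoc (xs : List Int) (a : Int) : pvFm (xs ++ [a]) = max (pvFm xs) a := by
  simp [pvFm, List.foldl_append]
lemma pvP_lt {t : List Char} {l r : Nat} (h : pvP t l r = true) : l < r := by
  by_contra hc
  have : r - l = 0 := by omega
  simp [pvP, pvSub, this, isBooP] at h
lemma pvLength_sub {t : List Char} {l r : Nat} (_hlr : l ≤ r) (hr : r ≤ t.length) :
    (pvSub t l r).length = r - l := by
  simp [pvSub]; omega
lemma pvBestIn_nonneg (t : List Char) (e : Nat) : 0 ≤ pvBestIn t e := by
  cases e with
  | zero => exact pvFm_nonneg _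
  | succ e => exact le_trans (pvFm_nonneg _) (le_max_right _ _)
lemma pvBestAt_le_bestIn (t : List Char) {r e : Nat} (h : r ≤ e) : pvBestAt t r ≤ pvBestIn t e := by
  induction e with
  | zero => have : r = 0 := by omega
            subst this; exact le_refl _
  | succ e ih =>
    rcases lt_or_ge r (e+1) with h' | h'
    · exact le_trans (ih (by omega)) (le_max_left _ _)
    · have : r = e + 1 := by omega
      subst this; exact le_max_right _ _
lemma pvVal_le_bestIn (t : List Char) {l r e : Nat} (hre : r ≤ e) : pvVal t l r ≤ pvBestIn t e := by
  by_cases hlr : l ≤ r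
  · refine le_trans ?_ (pvBestAt_le_bestIn t hre)
    exact pvLe_fm (List.mem_map.mpr ⟨l, List.mem_range.mpr (by omega), rfl⟩)
  · have : pvVal t l r = 0 := by
      rcases hp : pvP t l r with _ | _
      · simp [pvVal, hp]
      · exact absurd (pvP_lt hp) (by omega)
    rw [this]; exact pvBestIn_nonneg t e
lemma pvBestAt_attain (t : List Char) (r : Nat) :
    pvBestAt t r = 0 ∨ ∃ l, l ≤ r ∧ pvP t l r = true ∧ pvBestAt t r = ((r - l : Nat) : Int) := by
  rcases PySem.List.foldl_max_mem ((List.range (r + 1)).map (fun l => pvVal t l r)) 0 with h | h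
  · left; exact h
  · rcases List.mem_map.mp h with ⟨l, hl, hv⟩
    rcases hp : pvP t l r with _ | _
    · left; rw [pvBestAt, pvFm, ← hv]; simp [pvVal, hp]
    · right; exact ⟨l, by have := List.mem_range.mp hl; omega, hp, by
        rw [pvBestAt, pvFm, ← hv]; simp [pvVal, hp]⟩
lemma pvBestIn_attain (t : List Char) (e : Nat) :
    pvBestIn t e = 0 ∨ ∃ l r, l ≤ r ∧ r ≤ e ∧ pvP t l r = true ∧ pvBestIn t e = ((r - l : Nat) : Int) := by
  induction e with
  | zero =>
    rcases pvBestAt_attain t 0 with h | ⟨l, hl, hp, hv⟩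
    · left; exact h
    · right; exact ⟨l, 0, hl, le_refl _, hp, hv⟩
  | succ e ih =>
    by_cases h : pvBestAt t (e+1) ≤ pvBestIn t e
    · rw [show pvBestIn t (e+1) = max (pvBestIn t e) (pvBestAt t (e+1)) from rfl, max_eq_left h]
      rcases ih with h' | ⟨l, r, h1, h2, h3, h4⟩
      · left; exact h'
      · right; exact ⟨l, r, h1, by omega, h3, h4⟩
    · rw [show pvBestIn t (e+1) = max (pvBestIn t e) (pvBestAt t (e+1)) from rfl, max_eq_right (by omega)]
      rcases pvBestAt_attain t (e+1) with h' | ⟨l, hl, hp, hv⟩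
      · left; exact h'
      · right; exact ⟨l, e+1, hl, le_refl _, hp, hv⟩
lemma pvAnsUpto_nonneg (t : List Char) (m : Nat) : 0 ≤ pvAnsUpto t m := by
  cases m with
  | zero => exact pvFm_nonneg _
  | succ m => exact le_trans (pvFm_nonneg _) (le_max_right _ _)
lemma pvAnsAt_le_ansUpto (t : List Char) {r m : Nat} (h : r ≤ m) : pvAnsAt t r ≤ pvAnsUpto t m := by
  induction m with
  | zero => have : r = 0 := by omega
            subst this; exact le_refl _
  | succ m ih =>
    rcases lt_or_ge r (m+1) with h' | h'
    · exact le_trans (ih (by omega)) (le_max_left _ _)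
    · have : r = m + 1 := by omega
      subst this; exact le_max_right _ _
lemma pvG_le_ansUpto (t : List Char) {l r m : Nat} (hlr : l ≤ r) (hrm : r ≤ m) :
    pvG t l r ≤ pvAnsUpto t m := by
  refine le_trans ?_ (pvAnsAt_le_ansUpto t hrm)
  exact pvLe_fm (List.mem_map.mpr ⟨l, List.mem_range.mpr (by omega), rfl⟩)
lemma pvAnsUpto_le (t : List Char) {m : Nat} {c : Int} (h0 : 0 ≤ c)
    (h : ∀ l r, l ≤ r → r ≤ m → pvG t l r ≤ c) : pvAnsUpto t m ≤ c := by
  have hAt : ∀ r ≤ m, pvAnsAt t r ≤ c := by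
    intro r hr
    refine pvFm_le h0 ?_
    intro x hx
    rcases List.mem_map.mp hx with ⟨l, hl, hv⟩
    by_cases hlr : l ≤ r
    · rw [← hv]; exact h l r hlr hr
    · have : pvP t l r = false := by
        rcases hp : pvP t l r with _|_
        · rfl
        · exact absurd (pvP_lt hp) (by omega)
      rw [← hv]; simp [pvG, this]; exact h0
  have key : ∀ m', (∀ r, r ≤ m' → pvAnsAt t r ≤ c) → pvAnsUpto t m' ≤ c := by
    intro m'
    induction m' with
    | zero => intro hA; exact hA 0 (le_refl _)
    | succ m' ih =>
      intro hA
      exact max_le (ih (fun r hr => hA r (by omega))) (hA (m'+1) (le_refl _))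
  exact key m hAt

lemma pvHq_nonneg (t : List Char) (b1l b1r b2l b2r : Int) : 0 ≤ pvHq t b1l b1r b2l b2r := by
  refine le_trans ?_ (le_max_left _ _)
  refine le_trans ?_ (le_max_left _ _)
  split <;> simp

lemma pvBody_eq (t : List Char) (b1l b1r b2l b2r m : Int) (hm : 0 ≤ m) :
    (let boo1 := PySem.List.slice t (some b1l) (some b1r)
     let boo2 := PySem.List.slice t (some b2l) (some b2r)
     let m1 := if isBooP boo1 then max m (boo1.length : Int) else m
     let m2 := if isBooP boo2 then max m1 (boo2.length : Int) else m1
     if isBooP boo1 && isBooP boo2 then max m2 ((boo1.length : Int) + (boo2.length : Int)) else m2)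
    = max m (pvHq t b1l b1r b2l b2r) := by
  simp only [pvHq]
  have ha : (0:Int) ≤ ((PySem.List.slice t (some b1l) (some b1r)).length : Int) := Int.natCast_nonneg _
  have hb : (0:Int) ≤ ((PySem.List.slice t (some b2l) (some b2r)).length : Int) := Int.natCast_nonneg _
  cases h1 : isBooP (PySem.List.slice t (some b1l) (some b1r)) <;>
    cases h2 : isBooP (PySem.List.slice t (some b2l) (some b2r)) <;>
    simp only [Bool.and_self, Bool.and_false, Bool.false_and,
      Bool.false_eq_true, if_true, if_false] <;> omega

-- A's port equals the nested supremum pvS0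
lemma pvA_eq (s : String) : booAnalysis s = pvS0 s.toList (s.toList.length : Int) := by
  unfold booAnalysis
  set t := s.toList with ht
  set n : Int := (t.length : Int) with hn
  have L4 : ∀ (b1l b1r b2l : Int) (m : Int), 0 ≤ m →
      (PySem.List.pyRange b2l (n + 1)).foldl (fun m b2r =>
        let boo1 := PySem.List.slice t (some b1l) (some b1r)
        let boo2 := PySem.List.slice t (some b2l) (some b2r)
        let m1 := if isBooP boo1 then max m (boo1.length : Int) else m
        let m2 := if isBooP boo2 then max m1 (boo2.length : Int) else m1
        if isBooP boo1 && isBooP boo2 then max m2 ((boo1.length : Int) + (boo2.length : Int)) else m2) m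
      = max m (pvS3 t n b1l b1r b2l) := by
    intro b1l b1r b2l m hm
    exact pvFoldA _ _ _ (fun m x _ hm => pvBody_eq t b1l b1r b2l x m hm)
      (fun x _ => pvHq_nonneg t b1l b1r b2l x) m hm
  have L3 : ∀ (b1l b1r : Int) (m : Int), 0 ≤ m →
      (PySem.List.pyRange b1r (n + 1)).foldl (fun m b2l =>
        (PySem.List.pyRange b2l (n + 1)).foldl (fun m b2r =>
          let boo1 := PySem.List.slice t (some b1l) (some b1r)
          let boo2 := PySem.List.slice t (some b2l) (some b2r)
          let m1 := if isBooP boo1 then max m (boo1.length : Int) else m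
          let m2 := if isBooP boo2 then max m1 (boo2.length : Int) else m1
          if isBooP boo1 && isBooP boo2 then max m2 ((boo1.length : Int) + (boo2.length : Int)) else m2) m) m
      = max m (pvS2 t n b1l b1r) := by
    intro b1l b1r m hm
    exact pvFoldA _ _ _ (fun m x _ hm => L4 b1l b1r x m hm)
      (fun x _ => pvFm_nonneg _) m hm
  have L2 : ∀ (b1l : Int) (m : Int), 0 ≤ m →
      (PySem.List.pyRange b1l (n + 1)).foldl (fun m b1r =>
        (PySem.List.pyRange b1r (n + 1)).foldl (fun m b2l =>
          (PySem.List.pyRange b2l (n + 1)).foldl (fun m b2r =>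
            let boo1 := PySem.List.slice t (some b1l) (some b1r)
            let boo2 := PySem.List.slice t (some b2l) (some b2r)
            let m1 := if isBooP boo1 then max m (boo1.length : Int) else m
            let m2 := if isBooP boo2 then max m1 (boo2.length : Int) else m1
            if isBooP boo1 && isBooP boo2 then max m2 ((boo1.length : Int) + (boo2.length : Int)) else m2) m) m) m
      = max m (pvS1 t n b1l) := by
    intro b1l m hm
    exact pvFoldA _ _ _ (fun m x _ hm => L3 b1l x m hm)
      (fun x _ => pvFm_nonneg _) m hm
  have L1 := pvFoldA (PySem.List.pyRange 0 (n + 1)) _ (pvS1 t n)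
      (fun m x _ hm => L2 x m hm) (fun x _ => pvFm_nonneg _) 0 (le_refl 0)
  rw [L1, pvS0, max_eq_right (pvFm_nonneg _)]

-- pvHq over natural indices, in terms of pvVal/pvP
lemma pvHq_eq (t : List Char) {l1 r1 l2 r2 : Nat} (h12 : l1 ≤ r1) (hr1 : r1 ≤ t.length)
    (h34 : l2 ≤ r2) (hr2 : r2 ≤ t.length) :
    pvHq t (l1 : Int) (r1 : Int) (l2 : Int) (r2 : Int)
      = max (max (pvVal t l1 r1) (pvVal t l2 r2))
          (if pvP t l1 r1 && pvP t l2 r2 then ((r1 - l1 : Nat) : Int) + ((r2 - l2 : Nat) : Int) else 0) := by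
  have hs1 : PySem.List.slice t (some (l1 : Int)) (some (r1 : Int)) = pvSub t l1 r1 :=
    PySem.List.slice_natCast t l1 r1
  have hs2 : PySem.List.slice t (some (l2 : Int)) (some (r2 : Int)) = pvSub t l2 r2 :=
    PySem.List.slice_natCast t l2 r2
  simp only [pvHq, hs1, hs2, pvLength_sub h12 hr1, pvLength_sub h34 hr2, pvVal, pvP]
  rfl

-- pvS0 = pvAnsUpto (the common value, both directions)
lemma pvVal_le_g (t : List Char) (l r : Nat) : pvVal t l r ≤ pvG t l r := by
  rcases hp : pvP t l r with _ | _
  · simp [pvVal, pvG, hp]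
  · simp only [pvVal, pvG, hp, if_true]
    have := pvBestIn_nonneg t l
    omega

lemma pvHq_le_S0 (t : List Char) {l1 r1 l2 r2 : Nat}
    (h12 : l1 ≤ r1) (h23 : r1 ≤ l2) (h34 : l2 ≤ r2) (h4 : r2 ≤ t.length) :
    pvHq t (l1 : Int) (r1 : Int) (l2 : Int) (r2 : Int) ≤ pvS0 t (t.length : Int) := by
  refine le_trans ?_ (pvLe_fm (xs := (PySem.List.pyRange 0 ((t.length : Int) + 1)).map (pvS1 t (t.length : Int)))
    (List.mem_map.mpr ⟨(l1 : Int), PySem.List.mem_pyRange_one.mpr ⟨by omega, by omega⟩, rfl⟩))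
  refine le_trans ?_ (pvLe_fm (List.mem_map.mpr ⟨(r1 : Int), PySem.List.mem_pyRange_one.mpr ⟨by omega, by omega⟩, rfl⟩))
  refine le_trans ?_ (pvLe_fm (List.mem_map.mpr ⟨(l2 : Int), PySem.List.mem_pyRange_one.mpr ⟨by omega, by omega⟩, rfl⟩))
  exact pvLe_fm (List.mem_map.mpr ⟨(r2 : Int), PySem.List.mem_pyRange_one.mpr ⟨by omega, by omega⟩, rfl⟩)

lemma pvS0_le (t : List Char) : pvS0 t (t.length : Int) ≤ pvAnsUpto t t.length := by
  refine pvFm_le (pvAnsUpto_nonneg t t.length) ?_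
  intro x hx; rcases List.mem_map.mp hx with ⟨b1l, hm1, rfl⟩
  rw [PySem.List.mem_pyRange_one] at hm1
  refine pvFm_le (pvAnsUpto_nonneg t t.length) ?_
  intro x hx; rcases List.mem_map.mp hx with ⟨b1r, hm2, rfl⟩
  rw [PySem.List.mem_pyRange_one] at hm2
  refine pvFm_le (pvAnsUpto_nonneg t t.length) ?_
  intro x hx; rcases List.mem_map.mp hx with ⟨b2l, hm3, rfl⟩
  rw [PySem.List.mem_pyRange_one] at hm3
  refine pvFm_le (pvAnsUpto_nonneg t t.length) ?_
  intro x hx; rcases List.mem_map.mp hx with ⟨b2r, hm4, rfl⟩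
  rw [PySem.List.mem_pyRange_one] at hm4
  obtain ⟨l1, rfl⟩ : ∃ k : Nat, b1l = (k : Int) := ⟨b1l.toNat, (Int.toNat_of_nonneg (by omega)).symm⟩
  obtain ⟨r1, rfl⟩ : ∃ k : Nat, b1r = (k : Int) := ⟨b1r.toNat, (Int.toNat_of_nonneg (by omega)).symm⟩
  obtain ⟨l2, rfl⟩ : ∃ k : Nat, b2l = (k : Int) := ⟨b2l.toNat, (Int.toNat_of_nonneg (by omega)).symm⟩
  obtain ⟨r2, rfl⟩ : ∃ k : Nat, b2r = (k : Int) := ⟨b2r.toNat, (Int.toNat_of_nonneg (by omega)).symm⟩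
  have h12 : l1 ≤ r1 := by omega
  have h23 : r1 ≤ l2 := by omega
  have h34 : l2 ≤ r2 := by omega
  have h4 : r2 ≤ t.length := by omega
  rw [pvHq_eq t h12 (by omega) h34 h4]
  refine max_le (max_le ?_ ?_) ?_
  · exact le_trans (pvVal_le_g t l1 r1) (pvG_le_ansUpto t h12 (by omega))
  · exact le_trans (pvVal_le_g t l2 r2) (pvG_le_ansUpto t h34 h4)
  · rcases hp1 : pvP t l1 r1 with _ | _
    · simp only [Bool.false_and, Bool.false_eq_true, if_false]
      exact pvAnsUpto_nonneg t t.length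
    · rcases hp2 : pvP t l2 r2 with _ | _
      · simp only [Bool.and_false, Bool.false_eq_true, if_false]
        exact pvAnsUpto_nonneg t t.length
      · simp only [Bool.and_self, if_true]
        have hb : ((r1 - l1 : Nat) : Int) ≤ pvBestIn t l2 := by
          have := pvVal_le_bestIn t (l := l1) (r := r1) (e := l2) h23
          simpa [pvVal, hp1] using this
        have hg : pvG t l2 r2 = ((r2 - l2 : Nat) : Int) + pvBestIn t l2 := by
          simp [pvG, hp2]
        have := pvG_le_ansUpto t h34 h4
        omega

lemma pvLe_S0 (t : List Char) : pvAnsUpto t t.length ≤ pvS0 t (t.length : Int) := by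
  refine pvAnsUpto_le t (pvFm_nonneg _) ?_
  intro l r hlr hrn
  rcases hp : pvP t l r with _ | _
  · simp only [pvG, hp, Bool.false_eq_true, if_false]
    exact pvFm_nonneg _
  · rcases pvBestIn_attain t l with h0 | ⟨l', r', h1, h2, hp', hv⟩
    · have hg : pvG t l r = ((r - l : Nat) : Int) := by simp [pvG, hp, h0]
      rw [hg]
      refine le_trans ?_ (pvHq_le_S0 t hlr (le_refl r) (le_refl r) hrn)
      rw [pvHq_eq t hlr hrn (le_refl r) hrn]
      refine le_trans ?_ (le_max_left _ _)
      refine le_trans ?_ (le_max_left _ _)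
      simp [pvVal, hp]
    · have hg : pvG t l r = ((r - l : Nat) : Int) + ((r' - l' : Nat) : Int) := by
        simp [pvG, hp, hv]
      rw [hg]
      refine le_trans ?_ (pvHq_le_S0 t h1 h2 hlr hrn)
      rw [pvHq_eq t h1 (by omega) hlr hrn]
      refine le_trans ?_ (le_max_right _ _)
      simp only [hp', hp, Bool.and_self, if_true]
      omega

-- B's port equals pvAnsUpto
def pvAnsPrev (t : List Char) : Nat → Int
  | 0 => 0
  | m + 1 => pvAnsUpto t m

lemma pvAnsPrev_nonneg (t : List Char) (m : Nat) : 0 ≤ pvAnsPrev t m := by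
  cases m with
  | zero => exact le_refl 0
  | succ m => exact pvAnsUpto_nonneg t m

-- one inner pass (the l-loop at r = rn), with bestEnd = prefix maxima up to rn
lemma pvInner (t : List Char) (rn : Nat) :
    ∀ (k : Nat) (a0 c0 : Int), 0 ≤ a0 → 0 ≤ c0 →
    (List.map (fun i : Nat => (i : Int)) (List.range k)).foldl (fun (p : Int × Int) l =>
        if isBooP (PySem.List.slice t (some l) (some (rn : Int))) then
          let length := (rn : Int) - l
          let ans := max p.1 length
          let b := (PySem.List.pyGet? ((List.range rn).map (pvBestIn t)) l).getD 0
          let ans := if b > 0 then max ans (length + b) else ans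
          (ans, max p.2 length)
        else p) (a0, c0)
    = (max a0 (pvFm ((List.range k).map (fun l => pvG t l rn))),
       max c0 (pvFm ((List.range k).map (fun l => pvVal t l rn)))) := by
  intro k
  induction k with
  | zero => intro a0 c0 ha hc; simp [pvFm, max_eq_left ha, max_eq_left hc]
  | succ k ih =>
    intro a0 c0 ha hc
    rw [List.range_succ, List.map_append, List.foldl_append, ih a0 c0 ha hc]
    simp only [List.map_append, List.map_singleton]
    rw [pvFm_snoc, pvFm_snoc]
    simp only [List.foldl_cons, List.foldl_nil]
    have hcond : isBooP (PySem.List.slice t (some (k : Int)) (some (rn : Int))) = pvP t k rn := by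
      rw [PySem.List.slice_natCast]; rfl
    have hFg : 0 ≤ pvFm ((List.range k).map (fun l => pvG t l rn)) := pvFm_nonneg _
    have hFv : 0 ≤ pvFm ((List.range k).map (fun l => pvVal t l rn)) := pvFm_nonneg _
    rcases hp : pvP t k rn with _ | _
    · simp only [hcond, hp, Bool.false_eq_true, if_false, pvG, pvVal, Prod.mk.injEq]
      constructor <;> omega
    · have hkr : k < rn := pvP_lt hp
      have hb : (PySem.List.pyGet? ((List.range rn).map (pvBestIn t)) (k : Int)).getD 0
          = pvBestIn t k := by
        rw [PySem.List.pyGet?_natCast, List.getElem?_map, List.getElem?_range hkr]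
        rfl
      have hbn : 0 ≤ pvBestIn t k := pvBestIn_nonneg t k
      simp only [hcond, hp, if_true, hb, pvG, pvVal, Prod.mk.injEq]
      have hlen : ((rn - k : Nat) : Int) = (rn : Int) - (k : Int) := by omega
      constructor
      · by_cases h0 : 0 < pvBestIn t k <;> simp only [h0, if_true, if_false] <;> omega
      · omega

-- the outer r-loop builds the prefix-maximum table and the running answer
lemma pvOuter (t : List Char) : ∀ (m : Nat),
    (List.map (fun i : Nat => (i : Int)) (List.range m)).foldl (fun (st : Int × List Int) r =>
      let cur : Int := if st.2 == [] then 0 else (PySem.List.pyGet? st.2 (-1)).getD 0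
      let p := (PySem.List.pyRange 0 (r + 1)).foldl (fun (p : Int × Int) l =>
          if isBooP (PySem.List.slice t (some l) (some r)) then
            let length := r - l
            let ans := max p.1 length
            let b := (PySem.List.pyGet? st.2 l).getD 0
            let ans := if b > 0 then max ans (length + b) else ans
            (ans, max p.2 length)
          else p) (st.1, cur)
      (p.1, st.2 ++ [p.2])) ((0 : Int), ([] : List Int))
    = (pvAnsPrev t m, (List.range m).map (pvBestIn t)) := by
  intro m
  induction m with
  | zero => simp [pvAnsPrev]
  | succ m ih =>
    rw [List.range_succ, List.map_append, List.foldl_append, ih]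
    simp only [List.map_cons, List.map_nil, List.foldl_cons, List.foldl_nil]
    have hcur : (if ((List.range m).map (pvBestIn t) : List Int) == [] then (0:Int)
        else (PySem.List.pyGet? ((List.range m).map (pvBestIn t)) (-1)).getD 0)
        = (if m = 0 then 0 else pvBestIn t (m - 1)) := by
      cases m with
      | zero => rfl
      | succ m' =>
        rw [PySem.List.pyGet?_neg_one]
        rw [List.range_succ, List.map_append]
        simp
    have hrange : PySem.List.pyRange 0 ((m : Int) + 1) = List.map (fun i : Nat => (i : Int)) (List.range (m + 1)) := by
      have : ((m : Int) + 1) = ((m + 1 : Nat) : Int) := by push_cast; ring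
      rw [this, PySem.List.pyRange_zero_natCast]
    simp only [hcur, hrange]
    rw [pvInner t m (m + 1) _ _ (pvAnsPrev_nonneg t m)
      (by cases m <;> simp [pvBestIn_nonneg])]
    have h1 : max (pvAnsPrev t m) (pvFm ((List.range (m + 1)).map (fun l => pvG t l m)))
        = pvAnsPrev t (m + 1) := by
      cases m with
      | zero => exact max_eq_right (pvFm_nonneg _)
      | succ m' => rfl
    have h2 : max (if m = 0 then 0 else pvBestIn t (m - 1))
          (pvFm ((List.range (m + 1)).map (fun l => pvVal t l m)))
        = pvBestIn t m := by
      cases m with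
      | zero => exact max_eq_right (pvFm_nonneg _)
      | succ m' => rfl
    rw [h1, h2]
    simp

lemma pvB_eq (s : String) : booAnalysis_alt s = pvAnsUpto s.toList s.toList.length := by
  simp only [booAnalysis_alt]
  have hc : ((s.toList.length : Int) + 1) = ((s.toList.length + 1 : Nat) : Int) := by push_cast; ring
  rw [hc, PySem.List.pyRange_zero_natCast, pvOuter]
  rfl

-- ===== VERDICT (by name: the statement is the Claim_ definition above) =====
theorem booAnalysis_spec : Claim_equal_booAnalysis := by
  intro s _
  unfold Spec_booAnalysis
  rw [pvA_eq, pvB_eq]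
  exact le_antisymm (pvS0_le _) (pvLe_S0 _)
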